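-- pv_equiv track=rewrite | github.com/JK8789/thesis-apk-study | scripts/third_party_libs/match_androlibzoo_longest.py | keep_longest_non_overlapping
-- ===== SOURCE A (Python) =====
-- def prefix_depth(prefix: str) -> int:
--     return prefix.count(".") + 1
--
-- def keep_longest_non_overlapping(matched_prefixes: list[str]) -> list[str]:
--     """
--     Keep the most specific prefixes only.
--     If we already kept 'com.vk.superapp.miniappsads', we will drop 'com.vk.superapp'.
--     """
--     kept: list[str] = []
--     kept_set: set[str] = set()
--
--     # sort by depth desc, then lexicographically for determinism
--     for p in sorted(matched_prefixes, key=lambda x: (-prefix_depth(x), x)):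
--         # If any already-kept prefix is a descendant of p, then p is too generic
--         # Example: kept has com.vk.superapp.miniappsads, candidate p is com.vk.superapp -> skip
--         if any(k == p or k.startswith(p + ".") for k in kept_set):
--             continue
--         kept.append(p)
--         kept_set.add(p)
--
--     # return in stable order (depth desc, name)
--     return sorted(kept, key=lambda x: (-prefix_depth(x), x))
-- ===== SOURCE B (Python) =====
-- def keep_longest_non_overlapping(matched_prefixes: list[str]) -> list[str]:
--     """
--     Keep the most specific prefixes only: a prefix survives exactly when no
--     other input prefix is a strict dotted descendant of it.  One dedup pass,
--     one maximality filter over the unique set, one final sort.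
--     """
--     uniq = set(matched_prefixes)
--     kept = [p for p in uniq if not any(q.startswith(p + ".") for q in uniq)]
--     kept.sort(key=lambda x: (-x.count(".") - 1, x))
--     return kept
-- ===== Notes on version B (the rewrite author's own statement) =====
-- stated objective: simpler
-- what changed: Replaces A's greedy depth-ordered scan with an incrementally grown kept-set by a direct maximality filter: dedupe the input once, keep exactly the prefixes with no strict dotted descendant among the unique prefixes, then sort once by (-depth, name).
import Mathlib
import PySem

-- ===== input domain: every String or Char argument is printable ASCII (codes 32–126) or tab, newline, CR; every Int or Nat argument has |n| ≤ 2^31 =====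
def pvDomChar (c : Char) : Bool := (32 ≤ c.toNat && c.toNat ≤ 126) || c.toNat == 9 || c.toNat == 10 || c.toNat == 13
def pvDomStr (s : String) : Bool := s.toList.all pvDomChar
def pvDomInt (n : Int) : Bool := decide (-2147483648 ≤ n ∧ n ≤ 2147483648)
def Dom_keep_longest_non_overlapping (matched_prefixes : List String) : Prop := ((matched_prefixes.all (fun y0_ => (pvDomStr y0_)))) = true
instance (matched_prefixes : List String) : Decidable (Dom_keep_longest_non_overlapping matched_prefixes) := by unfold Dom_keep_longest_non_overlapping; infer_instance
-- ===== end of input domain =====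

-- B replaces A's greedy depth-ordered scan with a direct maximality filter over the deduplicated
-- prefixes (objective: simpler — one dedup, one filter, one sort; not claimed faster).

-- ===== PORT A =====
def prefix_depth (pre : String) : Int := (PySem.Str.count pre "." : Int) + 1

def keep_longest_non_overlapping (matched_prefixes : List String) : List String :=
  let st :=
    (PySem.List.sorted2 matched_prefixes (fun x => -(prefix_depth x)) (fun x => x)).foldl
      (fun (st : List String × PySem.Set String) p =>
        if st.2.any (fun k => k == p || PySem.Str.startswith k (p ++ ".")) then st
        else (st.1 ++ [p], PySem.Set.add st.2 p))
      ([], PySem.Set.empty)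
  PySem.List.sorted2 st.1 (fun x => -(prefix_depth x)) (fun x => x)

-- ===== PORT B =====
def keep_longest_non_overlapping_alt (matched_prefixes : List String) : List String :=
  let uniq : PySem.Set String := PySem.Set.ofList matched_prefixes
  let kept := uniq.filter (fun p => ! uniq.any (fun q => PySem.Str.startswith q (p ++ ".")))
  PySem.List.sorted2 kept (fun x => -(PySem.Str.count x "." : Int) - 1) (fun x => x)

-- ===== PRECONDITION & SPEC =====
def Spec_keep_longest_non_overlapping (matched_prefixes : List String) (out : List String) : Prop := out = keep_longest_non_overlapping_alt matched_prefixes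
instance (matched_prefixes : List String) (out : List String) : Decidable (Spec_keep_longest_non_overlapping matched_prefixes out) := by unfold Spec_keep_longest_non_overlapping; infer_instance

-- ===== CLAIM (what is proved, stated in full; the proofs are below) =====
def Claim_equal_keep_longest_non_overlapping : Prop := ∀ (matched_prefixes : List String), Dom_keep_longest_non_overlapping matched_prefixes → Spec_keep_longest_non_overlapping matched_prefixes (keep_longest_non_overlapping matched_prefixes)

-- ===== LEMMAS AND PROOFS =====

-- 'q is a strict dotted descendant of p' (q starts with p + ".")
def pvDesc (q p : String) : Prop := p.toList ++ ['.'] <+: q.toList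

-- the sort key used by both final sorts (first component)
def pvKA (x : String) : Int := -(prefix_depth x)

-- A's loop, with the kept list / kept set collapsed into the single list they both equal
def pvAux (s : List String) : List String → List String
  | [] => s
  | p :: t =>
    if s.any (fun k => k == p || PySem.Str.startswith k (p ++ ".")) then pvAux s t
    else pvAux (s ++ [p]) t

theorem sorted2_eq_sorted_lex (xs : List String) (k : String → Int) :
    PySem.List.sorted2 xs k (fun x => x) false
      = PySem.List.sorted xs (fun x => (toLex (k x, x) : Int ×ₗ String)) false := by
  rw [PySem.List.sorted_eq_foldl_insertBy]
  have h : (fun (a b : String) => decide (k a < k b) || (!decide (k b < k a) && decide (a < b)))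
      = (fun a b => decide ((toLex (k a, a) : Int ×ₗ String) < toLex (k b, b))) := by
    funext a b
    rcases lt_trichotomy (k a) (k b) with h | h | h
    · simp [Prod.Lex.lt_iff, h]
    · simp [Prod.Lex.lt_iff, h]
    · simp [Prod.Lex.lt_iff, h, not_lt_of_gt h, ne_of_gt h]
  show List.foldl (fun acc x => PySem.List.insertBy _ x acc) [] xs = _
  rw [h]
  simp

-- single-character substring count is the character count
theorem chars_count_single (cs : List Char) (c : Char) :
    PySem.Chars.count cs [c] = cs.count c := by
  show PySem.Chars.count.go [c] cs.length cs 0 = cs.count c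
  have go : ∀ (l : List Char) (fuel acc : Nat), l.length ≤ fuel →
      PySem.Chars.count.go [c] fuel l acc = acc + l.count c := by
    intro l
    induction l with
    | nil => intro fuel acc _; cases fuel <;> simp [PySem.Chars.count.go]
    | cons h t ih =>
      intro fuel acc hf
      cases fuel with
      | zero => simp at hf
      | succ f =>
        by_cases hc : h = c
        · simp [PySem.Chars.count.go, hc, List.isPrefixOf, ih f (acc+1) (by simpa using hf)]
          omega
        · simp only [PySem.Chars.count.go, List.isPrefixOf, List.count_cons]
          have : (c == h) = false := by simp [Ne.symm hc]
          simp [this, hc, ih f acc (by simpa using hf)]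
  simpa using go cs cs.length 0 le_rfl

theorem startswith_iff_desc (k p : String) :
    (PySem.Str.startswith k (p ++ ".") = true) ↔ pvDesc k p := by
  rw [PySem.Str.startswith_eq, PySem.Chars.startswith_iff, pvDesc]
  simp

theorem test_iff (s : List String) (p : String) :
    (s.any (fun k => k == p || PySem.Str.startswith k (p ++ "."))) = true
      ↔ ∃ k ∈ s, k = p ∨ pvDesc k p := by
  simp only [List.any_eq_true, Bool.or_eq_true, beq_iff_eq, startswith_iff_desc]

theorem pvDesc_depth_lt (q p : String) (h : pvDesc q p) : pvKA q < pvKA p := by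
  obtain ⟨r, hr⟩ := h
  simp only [pvKA, prefix_depth, PySem.Str.count_eq]
  have hq : q.toList = p.toList ++ ['.'] ++ r := hr.symm
  have : PySem.Chars.count q.toList ".".toList
      = PySem.Chars.count p.toList ".".toList + 1 + r.count '.' := by
    have hdot : (".".toList : List Char) = ['.'] := rfl
    rw [hdot, chars_count_single, chars_count_single, hq]
    simp [List.count_append]
    omega
  omega

theorem pvDesc_of_eq_or_desc (k q p : String) (hq : pvDesc q p) (hk : k = q ∨ pvDesc k q) :
    pvDesc k p := by
  rcases hk with rfl | hk
  · exact hq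
  · exact hq.trans ((List.prefix_append q.toList ['.']).trans hk)

-- the fold over (kept, kept_set) computes pvAux on the diagonal
theorem foldl_eq_aux (l : List String) (s : List String) :
    l.foldl
      (fun (st : List String × PySem.Set String) p =>
        if st.2.any (fun k => k == p || PySem.Str.startswith k (p ++ ".")) then st
        else (st.1 ++ [p], PySem.Set.add st.2 p))
      (s, s) = (pvAux s l, pvAux s l) := by
  induction l generalizing s with
  | nil => rfl
  | cons p t ih =>
    by_cases h : (s.any (fun k => k == p || PySem.Str.startswith k (p ++ "."))) = true
    · simp only [List.foldl_cons, pvAux, h, if_true]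
      exact ih s
    · have hnc : ¬ ∃ k ∈ s, k = p ∨ pvDesc k p := fun hc => h ((test_iff s p).mpr hc)
      have hmem : p ∉ s := fun hm => hnc ⟨p, hm, Or.inl rfl⟩
      have hadd : PySem.Set.add s p = s ++ [p] := by
        simp [PySem.Set.add, PySem.Set.contains, hmem]
      simp only [List.foldl_cons, pvAux, h, if_false, Bool.false_eq_true, hadd]
      exact ih (s ++ [p])

-- main characterisation of A's greedy loop
theorem pvAux_char (l : List String) : ∀ (done s full : List String),
    full = done ++ l →
    full.Pairwise (fun a b => pvKA a ≤ pvKA b) →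
    s.Nodup →
    (∀ k ∈ s, k ∈ done) →
    (∀ x ∈ done, ∃ k ∈ s, k = x ∨ pvDesc k x) →
    (∀ k ∈ s, ∀ q ∈ full, ¬ pvDesc q k) →
    (pvAux s l).Nodup ∧
      ∀ p, p ∈ pvAux s l ↔ p ∈ s ∨ (p ∈ l ∧ ∀ q ∈ full, ¬ pvDesc q p) := by
  induction l with
  | nil =>
    intro done s full hfull hpw hnd hsub hcov hmax
    refine ⟨hnd, fun p => ?_⟩
    simp [pvAux]
  | cons p t ih =>
    intro done s full hfull hpw hnd hsub hcov hmax
    have hdone_sub : ∀ x ∈ done, x ∈ full := by intro x hx; rw [hfull]; exact List.mem_append_left _ hx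
    have hhead : ∀ q ∈ full, pvKA q < pvKA p → q ∈ done := by
      intro q hq hlt
      rw [hfull] at hq
      rcases List.mem_append.mp hq with h | h
      · exact h
      · exfalso
        rcases List.mem_cons.mp h with rfl | h
        · exact lt_irrefl _ hlt
        · have hpw' := (List.pairwise_append.mp (hfull ▸ hpw)).2.1
          have := (List.pairwise_cons.mp hpw').1 q h
          omega
    by_cases htest : (s.any (fun k => k == p || PySem.Str.startswith k (p ++ "."))) = true
    · -- p is skipped
      obtain ⟨k, hk, hkp⟩ := (test_iff s p).mp htest
      have := ih (done ++ [p]) s full (by simp [hfull]) hpw hnd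
        (fun k hk => List.mem_append_left _ (hsub k hk))
        (by
          intro x hx
          rcases List.mem_append.mp hx with h | h
          · exact hcov x h
          · rcases List.mem_singleton.mp h with rfl
            exact ⟨k, hk, hkp⟩)
        hmax
      have heq : pvAux s (p :: t) = pvAux s t := by rw [pvAux, if_pos htest]
      rw [heq]
      refine ⟨this.1, fun x => ?_⟩
      rw [this.2 x]
      constructor
      · rintro (hx | ⟨hx, hP⟩)
        · exact Or.inl hx
        · exact Or.inr ⟨List.mem_cons_of_mem _ hx, hP⟩
      · rintro (hx | ⟨hx, hP⟩)
        · exact Or.inl hx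
        · rcases List.mem_cons.mp hx with rfl | hx
          · -- x = p skipped: either p ∈ s or some kept descendant contradicts hP
            rcases hkp with rfl | hkd
            · exact Or.inl hk
            · exact absurd (hP k (hdone_sub k (hsub k hk))) (not_not_intro hkd)
          · exact Or.inr ⟨hx, hP⟩
    · -- p is kept
      have hnc : ¬ ∃ k ∈ s, k = p ∨ pvDesc k p := fun hc => htest ((test_iff s p).mpr hc)
      have hps : p ∉ s := fun hm => hnc ⟨p, hm, Or.inl rfl⟩
      have hPp : ∀ q ∈ full, ¬ pvDesc q p := by
        intro q hq hqd
        have hqdone : q ∈ done := hhead q hq (pvDesc_depth_lt q p hqd)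
        obtain ⟨k, hk, hkq⟩ := hcov q hqdone
        exact hnc ⟨k, hk, Or.inr (pvDesc_of_eq_or_desc k q p hqd hkq)⟩
      have := ih (done ++ [p]) (s ++ [p]) full (by simp [hfull]) hpw
        (by
          rw [List.nodup_append]
          exact ⟨hnd, List.nodup_singleton p, by
            intro a ha b hb
            rw [List.mem_singleton] at hb
            subst hb
            exact fun h => hps (h ▸ ha)⟩)
        (by
          intro k hk
          rcases List.mem_append.mp hk with h | h
          · exact List.mem_append_left _ (hsub k h)
          · exact List.mem_append_right _ h)
        (by
          intro x hx
          rcases List.mem_append.mp hx with h | h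
          · obtain ⟨k, hk, hkx⟩ := hcov x h
            exact ⟨k, List.mem_append_left _ hk, hkx⟩
          · rcases List.mem_singleton.mp h with rfl
            exact ⟨x, List.mem_append_right _ (List.mem_singleton_self _), Or.inl rfl⟩)
        (by
          intro k hk q hq
          rcases List.mem_append.mp hk with h | h
          · exact hmax k h q hq
          · rcases List.mem_singleton.mp h with rfl
            exact hPp q hq)
      have heq : pvAux s (p :: t) = pvAux (s ++ [p]) t := by rw [pvAux, if_neg htest]
      rw [heq]
      refine ⟨this.1, fun x => ?_⟩
      rw [this.2 x]
      constructor
      · rintro (hx | ⟨hx, hP⟩)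
        · rcases List.mem_append.mp hx with h | h
          · exact Or.inl h
          · rcases List.mem_singleton.mp h with rfl
            exact Or.inr ⟨List.mem_cons_self, hPp⟩
        · exact Or.inr ⟨List.mem_cons_of_mem _ hx, hP⟩
      · rintro (hx | ⟨hx, hP⟩)
        · exact Or.inl (List.mem_append_left _ hx)
        · rcases List.mem_cons.mp hx with rfl | hx
          · exact Or.inl (List.mem_append_right _ (List.mem_singleton_self _))
          · exact Or.inr ⟨hx, hP⟩

-- ===== VERDICT (by name: the statement is the Claim_ definition above) =====
-- membership and nodup of B's filtered list
theorem keptB_mem (xs : List String) (p : String) :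
    p ∈ (PySem.Set.ofList xs).filter
        (fun p => ! (PySem.Set.ofList xs).any (fun q => PySem.Str.startswith q (p ++ ".")))
      ↔ p ∈ xs ∧ ∀ q ∈ xs, ¬ pvDesc q p := by
  rw [List.mem_filter, PySem.Set.mem_ofList]
  simp only [Bool.not_eq_eq_eq_not, Bool.not_true, List.any_eq_false]
  constructor
  · rintro ⟨h1, h2⟩
    refine ⟨h1, fun q hq hd => ?_⟩
    have h3 := h2 q ((PySem.Set.mem_ofList xs q).mpr hq)
    rw [← startswith_iff_desc] at hd
    exact h3 hd
  · rintro ⟨h1, h2⟩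
    refine ⟨h1, fun q hq => ?_⟩
    have h3 := h2 q ((PySem.Set.mem_ofList xs q).mp hq)
    rw [← startswith_iff_desc] at h3
    exact h3

theorem keep_longest_non_overlapping_spec : Claim_equal_keep_longest_non_overlapping := by
  intro xs _
  unfold Spec_keep_longest_non_overlapping keep_longest_non_overlapping keep_longest_non_overlapping_alt
  simp only []
  -- name the two pre-sort lists
  set kA : String → Int := fun x => -(prefix_depth x) with hkA
  have hkeyB : (fun x => -(PySem.Str.count x "." : Int) - 1) = kA := by
    funext x
    simp [hkA, prefix_depth]
    ring
  rw [hkeyB]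
  set full := PySem.List.sorted2 xs kA (fun x => x) false with hfullDef
  -- A's fold is pvAux on the diagonal
  have hfold := foldl_eq_aux full []
  have hstep :
      (full.foldl
        (fun (st : List String × PySem.Set String) p =>
          if st.2.any (fun k => k == p || PySem.Str.startswith k (p ++ ".")) then st
          else (st.1 ++ [p], PySem.Set.add st.2 p))
        ([], PySem.Set.empty)).1 = pvAux [] full := by
    rw [show (([], PySem.Set.empty) : List String × PySem.Set String)
          = (([] : List String), ([] : List String)) from rfl, hfold]
  rw [hstep]
  -- pairwise on the first key component of the sorted input
  have hpw : full.Pairwise (fun a b => pvKA a ≤ pvKA b) := by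
    have h1 := sorted2_eq_sorted_lex xs kA
    have h2 := PySem.List.sorted_pairwise xs (fun x => (toLex (kA x, x) : Int ×ₗ String))
    rw [hfullDef, h1]
    refine h2.imp ?_
    intro a b hab
    rcases Prod.Lex.le_iff.mp hab with h | ⟨h, _⟩
    · exact le_of_lt h
    · exact le_of_eq h
  have hchar := pvAux_char full [] [] full rfl hpw List.nodup_nil
    (by simp) (by simp) (by simp)
  -- membership in full is membership in xs
  have hmemfull : ∀ p, p ∈ full ↔ p ∈ xs := by
    intro p
    exact (PySem.List.sorted2_perm xs kA (fun x => x) false).mem_iff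
  -- the two kept lists are permutations of each other
  have hperm : (pvAux [] full).Perm
      ((PySem.Set.ofList xs).filter
        (fun p => ! (PySem.Set.ofList xs).any (fun q => PySem.Str.startswith q (p ++ ".")))) := by
    rw [List.perm_ext_iff_of_nodup hchar.1 ((PySem.Set.nodup_ofList xs).filter _)]
    intro p
    rw [hchar.2 p, keptB_mem]
    constructor
    · rintro (h | ⟨h1, h2⟩)
      · simp at h
      · exact ⟨(hmemfull p).mp h1, fun q hq => h2 q ((hmemfull q).mpr hq)⟩
    · rintro ⟨h1, h2⟩
      exact Or.inr ⟨(hmemfull p).mpr h1, fun q hq => h2 q ((hmemfull q).mp hq)⟩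
  rw [sorted2_eq_sorted_lex, sorted2_eq_sorted_lex]
  exact PySem.List.sorted_eq_sorted_of_perm _ _ _
    (fun a b h => congrArg (fun z => (ofLex z).2) h) hperm
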